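-- pv_equiv track=rewrite | github.com/Evelyn-Tan-0417/ZeroJudge-Competitive-Programming | src/array-manipulation/f579_shopping_cart.py | simulate_shopping_cart
-- ===== SOURCE A (Python) =====
-- def simulate_shopping_cart(operations, product_a_id, product_b_id):
--     """
--     Simulate shopping cart operations for a single customer
--
--     Args:
--         operations: list of integers representing cart operations
--         product_a_id: ID of product A
--         product_b_id: ID of product B
--
--     Returns:
--         bool: True if customer ends with both products A and B
--     """
--     # Track quantities of products A and B in cart
--     product_a_count = 0
--     product_b_count = 0
--
--     # Process each operation
--     for operation in operations:
--         if operation == product_a_id: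
--             # Add product A
--             product_a_count += 1
--         elif operation == -product_a_id:
--             # Remove product A (ensure non-negative)
--             product_a_count -= 1
--             if product_a_count < 0:
--                 product_a_count = 0
--         elif operation == product_b_id:
--             # Add product B
--             product_b_count += 1
--         elif operation == -product_b_id:
--             # Remove product B (ensure non-negative)
--             product_b_count -= 1
--             if product_b_count < 0:
--                 product_b_count = 0
--
--     # Customer has both products if both counts > 0
--     return product_a_count >= 1 and product_b_count >= 1
-- ===== SOURCE B (Python) =====
-- def simulate_shopping_cart(operations, product_a_id, product_b_id):
--     # Reverse scan: a clamped-at-zero counter ends positive iff some SUFFIX of its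
--     # signed delta sequence has positive sum.  So walk the operations backwards,
--     # keep a running suffix sum per product (classified with A's elif priority),
--     # and latch a flag the moment a suffix sum turns positive (only possible on an add).
--     suffix_a = 0
--     suffix_b = 0
--     found_a = False
--     found_b = False
--     for op in reversed(operations):
--         if op == product_a_id:
--             suffix_a += 1
--             if suffix_a >= 1:
--                 found_a = True
--         elif op == -product_a_id:
--             suffix_a -= 1
--         elif op == product_b_id:
--             suffix_b += 1
--             if suffix_b >= 1:
--                 found_b = True
--         elif op == -product_b_id:
--             suffix_b -= 1
--     return found_a and found_b
-- ===== Notes on version B (the rewrite author's own statement) =====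
-- stated objective: alternative
-- what changed: B replaces A's forward simulation with clamped counters by a backwards scan that maintains running suffix sums of the signed deltas and latches a flag once a suffix sum turns positive, using the fact that a clamped counter ends positive iff some suffix of its delta sequence has positive sum.
import Mathlib
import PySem

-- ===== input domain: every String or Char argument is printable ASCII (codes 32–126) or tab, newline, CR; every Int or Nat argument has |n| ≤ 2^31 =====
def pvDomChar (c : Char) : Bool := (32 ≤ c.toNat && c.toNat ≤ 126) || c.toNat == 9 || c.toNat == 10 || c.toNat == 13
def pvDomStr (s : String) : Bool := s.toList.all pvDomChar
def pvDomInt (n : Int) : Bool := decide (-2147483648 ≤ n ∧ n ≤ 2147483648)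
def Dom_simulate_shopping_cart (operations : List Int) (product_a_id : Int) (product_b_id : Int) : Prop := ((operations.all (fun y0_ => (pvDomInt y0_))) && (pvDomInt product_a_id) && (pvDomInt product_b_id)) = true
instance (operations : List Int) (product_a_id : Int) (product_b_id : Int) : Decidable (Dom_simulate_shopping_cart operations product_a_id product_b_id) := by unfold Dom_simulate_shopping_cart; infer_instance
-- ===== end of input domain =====

-- B scans the operations BACKWARDS keeping running suffix sums of the signed deltas and
-- latching a flag once a suffix sum turns positive, instead of A's forward simulation
-- with clamped counters — an alternative algorithm, same O(n) cost.

-- ===== PORT A =====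
-- one iteration of A's loop body: elif chain updating the (a_count, b_count) pair
def cartStep (pa pb : Int) (s : Int × Int) (op : Int) : Int × Int :=
  if op = pa then (s.1 + 1, s.2)
  else if op = -pa then (if s.1 - 1 < 0 then (0 : Int) else s.1 - 1, s.2)
  else if op = pb then (s.1, s.2 + 1)
  else if op = -pb then (s.1, if s.2 - 1 < 0 then (0 : Int) else s.2 - 1)
  else s

def simulate_shopping_cart (operations : List Int) (product_a_id : Int) (product_b_id : Int) : Bool :=
  let s := operations.foldl (cartStep product_a_id product_b_id) (0, 0)
  decide (1 ≤ s.1) && decide (1 ≤ s.2)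

-- ===== PORT B =====
-- one iteration of B's reverse loop: state = (suffix_a, suffix_b, found_a, found_b)
def revStep (pa pb : Int) (s : Int × Int × Bool × Bool) (op : Int) : Int × Int × Bool × Bool :=
  if op = pa then (s.1 + 1, s.2.1, s.2.2.1 || decide (1 ≤ s.1 + 1), s.2.2.2)
  else if op = -pa then (s.1 - 1, s.2.1, s.2.2.1, s.2.2.2)
  else if op = pb then (s.1, s.2.1 + 1, s.2.2.1, s.2.2.2 || decide (1 ≤ s.2.1 + 1))
  else if op = -pb then (s.1, s.2.1 - 1, s.2.2.1, s.2.2.2)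
  else s

def simulate_shopping_cart_alt (operations : List Int) (product_a_id : Int) (product_b_id : Int) : Bool :=
  let s := operations.reverse.foldl (revStep product_a_id product_b_id) (0, 0, false, false)
  s.2.2.1 && s.2.2.2

-- ===== PRECONDITION & SPEC =====
def Spec_simulate_shopping_cart (operations : List Int) (product_a_id : Int) (product_b_id : Int) (out : Bool) : Prop := out = simulate_shopping_cart_alt operations product_a_id product_b_id
instance (operations : List Int) (product_a_id : Int) (product_b_id : Int) (out : Bool) : Decidable (Spec_simulate_shopping_cart operations product_a_id product_b_id out) := by unfold Spec_simulate_shopping_cart; infer_instance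

-- ===== CLAIM (what is proved, stated in full; the proofs are below) =====
def Claim_equal_simulate_shopping_cart : Prop := ∀ (operations : List Int) (product_a_id : Int) (product_b_id : Int), Dom_simulate_shopping_cart operations product_a_id product_b_id → Spec_simulate_shopping_cart operations product_a_id product_b_id (simulate_shopping_cart operations product_a_id product_b_id)

-- ===== LEMMAS AND PROOFS =====

-- The joint invariant: relative to A's forward fold started from nonnegative counts (a, b)
-- and B's backward fold over the same list, (i) a positive suffix sum implies the flag is
-- latched, (ii) A's final count is positive iff the flag is latched or the start count
-- survives the whole delta sum.
set_option maxHeartbeats 1600000 in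
theorem cart_key (pa pb : Int) (ops : List Int) :
    ∀ a b : Int, 0 ≤ a → 0 ≤ b →
      (let f := ops.foldl (cartStep pa pb) (a, b)
       let r := ops.foldr (fun op s => revStep pa pb s op) (0, 0, false, false)
       ((1 ≤ r.1 → r.2.2.1 = true) ∧ (1 ≤ r.2.1 → r.2.2.2 = true)) ∧
       (1 ≤ f.1 ↔ (r.2.2.1 = true ∨ 1 ≤ a + r.1)) ∧
       (1 ≤ f.2 ↔ (r.2.2.2 = true ∨ 1 ≤ b + r.2.1))) := by
  induction ops with
  | nil => intro a b ha hb; simp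
  | cons op t ih =>
    intro a b ha hb
    simp only [List.foldl_cons, List.foldr_cons]
    rcases hr : t.foldr (fun op s => revStep pa pb s op) (0, 0, false, false) with ⟨sa, sb, fa, fb⟩
    simp only [cartStep, revStep]
    split_ifs with h1 h2 h3 h4 h5
    · obtain ⟨⟨iA, iB⟩, eA, eB⟩ := ih (a + 1) b (by omega) hb
      rw [hr] at iA iB eA eB
      simp only [Bool.or_eq_true, decide_eq_true_eq] at iA iB eA eB ⊢
      cases fa <;> cases fb <;> simp_all <;> omega
    · obtain ⟨⟨iA, iB⟩, eA, eB⟩ := ih 0 b le_rfl hb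
      rw [hr] at iA iB eA eB
      simp only [Bool.or_eq_true, decide_eq_true_eq] at iA iB eA eB ⊢
      cases fa <;> cases fb <;> simp_all <;> omega
    · obtain ⟨⟨iA, iB⟩, eA, eB⟩ := ih (a - 1) b (by omega) hb
      rw [hr] at iA iB eA eB
      simp only [Bool.or_eq_true, decide_eq_true_eq] at iA iB eA eB ⊢
      cases fa <;> cases fb <;> simp_all <;> omega
    · obtain ⟨⟨iA, iB⟩, eA, eB⟩ := ih a (b + 1) ha (by omega)
      rw [hr] at iA iB eA eB
      simp only [Bool.or_eq_true, decide_eq_true_eq] at iA iB eA eB ⊢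
      cases fa <;> cases fb <;> simp_all <;> omega
    · obtain ⟨⟨iA, iB⟩, eA, eB⟩ := ih a 0 ha le_rfl
      rw [hr] at iA iB eA eB
      simp only [Bool.or_eq_true, decide_eq_true_eq] at iA iB eA eB ⊢
      cases fa <;> cases fb <;> simp_all <;> omega
    · obtain ⟨⟨iA, iB⟩, eA, eB⟩ := ih a (b - 1) ha (by omega)
      rw [hr] at iA iB eA eB
      simp only [Bool.or_eq_true, decide_eq_true_eq] at iA iB eA eB ⊢
      cases fa <;> cases fb <;> simp_all <;> omega
    · obtain ⟨⟨iA, iB⟩, eA, eB⟩ := ih a b ha hb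
      rw [hr] at iA iB eA eB
      simp only [Bool.or_eq_true, decide_eq_true_eq] at iA iB eA eB ⊢
      cases fa <;> cases fb <;> simp_all <;> omega

-- ===== VERDICT (by name: the statement is the Claim_ definition above) =====
theorem simulate_shopping_cart_spec : Claim_equal_simulate_shopping_cart := by
  intro operations pa pb _
  unfold Spec_simulate_shopping_cart simulate_shopping_cart simulate_shopping_cart_alt
  rw [List.foldl_reverse]
  obtain ⟨⟨iA, iB⟩, eA, eB⟩ := cart_key pa pb operations 0 0 le_rfl le_rfl
  set r := operations.foldr (fun op s => revStep pa pb s op) (0, 0, false, false) with hr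
  cases hA : r.2.2.1 <;> cases hB : r.2.2.2 <;> simp_all <;> omega
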